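-- pv_equiv track=rewrite | github.com/lpsz-star/fund_research_v2 | src/fund_research_v2/features/feature_builder.py | _manager_change_count
-- ===== SOURCE A (Python) =====
-- def _manager_change_count(manager_rows: list[dict[str, object]], window: int) -> int:
--     """统计窗口内经理名称发生变化的次数。"""
--     if not manager_rows:
--         return 0
--     subset = manager_rows[-window:]
--     previous_name = ""
--     change_count = 0
--     for row in subset:
--         manager_name = str(row.get("manager_name") or "").strip()
--         if previous_name and manager_name and manager_name != previous_name:
--             change_count += 1
--         if manager_name:
--             previous_name = manager_name
--     return change_count
-- ===== SOURCE B (Python) =====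
-- def _manager_change_count(manager_rows: list[dict[str, object]], window: int) -> int:
--     subset = manager_rows[-window:]
--     if not subset:
--         return 0
--
--     def summarize(seg):
--         # returns (change_count, first_nonempty_name, last_nonempty_name) for seg
--         if len(seg) == 1:
--             name = str(seg[0].get("manager_name") or "").strip()
--             return (0, name, name) if name else (0, None, None)
--         mid = len(seg) // 2
--         c1, f1, l1 = summarize(seg[:mid])
--         c2, f2, l2 = summarize(seg[mid:])
--         cross = 1 if l1 is not None and f2 is not None and l1 != f2 else 0
--         return (c1 + c2 + cross, f1 if f1 is not None else f2, l2 if l2 is not None else l1)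
--
--     return summarize(subset)[0]
-- ===== Notes on version B (the rewrite author's own statement) =====
-- stated objective: alternative
-- what changed: Replaces A's single stateful left-to-right pass (previous_name carried across blank rows) by a divide-and-conquer recursion: each half of the window is summarized as (change count, first non-empty name, last non-empty name) and the summaries are merged with a boundary comparison.
import Mathlib
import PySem

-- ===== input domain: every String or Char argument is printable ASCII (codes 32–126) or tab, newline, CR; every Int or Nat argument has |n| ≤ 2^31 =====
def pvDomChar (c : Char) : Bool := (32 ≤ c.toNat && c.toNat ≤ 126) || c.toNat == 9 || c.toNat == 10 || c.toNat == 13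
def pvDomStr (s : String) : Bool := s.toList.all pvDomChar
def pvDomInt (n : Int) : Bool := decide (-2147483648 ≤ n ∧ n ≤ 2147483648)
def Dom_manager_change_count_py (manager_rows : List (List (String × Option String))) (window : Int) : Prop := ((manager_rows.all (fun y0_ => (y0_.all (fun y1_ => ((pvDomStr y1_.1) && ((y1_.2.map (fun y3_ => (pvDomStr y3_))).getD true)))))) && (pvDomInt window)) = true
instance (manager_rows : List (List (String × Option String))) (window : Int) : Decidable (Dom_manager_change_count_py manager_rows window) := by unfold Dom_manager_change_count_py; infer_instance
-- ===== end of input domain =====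

-- B replaces A's single stateful loop (previous_name carried across blank rows) by a
-- divide-and-conquer recursion merging (count, first non-empty name, last non-empty name)
-- summaries of the two halves (objective: alternative decomposition, same result).

-- ===== PORT A =====
-- str(row.get("manager_name") or "").strip(); values are Optional[str], so `or ""` maps None and "" to ""
def pvNormNameA (row : List (String × Option String)) : String :=
  PySem.Str.strip (match (PySem.Dict.mk row).get? "manager_name" with
    | some (some s) => s
    | _ => "")

-- one iteration of A's for-loop over the state (previous_name, change_count)
def pvStepA (st : String × Int) (row : List (String × Option String)) : String × Int :=
  let manager_name := pvNormNameA row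
  let st1 := if st.1 ≠ "" ∧ manager_name ≠ "" ∧ manager_name ≠ st.1 then (st.1, st.2 + 1) else st
  if manager_name ≠ "" then (manager_name, st1.2) else st1

def manager_change_count_py (manager_rows : List (List (String × Option String))) (window : Int) : Int :=
  if manager_rows = [] then 0
  else ((PySem.List.slice manager_rows (some (-window)) none).foldl pvStepA ("", 0)).2

-- ===== PORT B =====
-- base case of summarize: a one-row segment
def pvLeafB (row : List (String × Option String)) : Int × Option String × Option String :=
  let name := PySem.Str.strip (match (PySem.Dict.mk row).get? "manager_name" with
    | some (some s) => s
    | _ => "")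
  if name ≠ "" then (0, some name, some name) else (0, none, none)

-- merge of the two half-summaries (c1+c2+cross, f1 if f1 is not None else f2, l2 if l2 is not None else l1)
def pvCombineB (s1 s2 : Int × Option String × Option String) : Int × Option String × Option String :=
  let cross : Int := match s1.2.2, s2.2.1 with
    | some l1, some f2 => if l1 ≠ f2 then 1 else 0
    | _, _ => 0
  (s1.1 + s2.1 + cross,
   (match s1.2.1 with | some f1 => some f1 | none => s2.2.1),
   (match s2.2.2 with | some l2 => some l2 | none => s1.2.2))

-- summarize(seg); seg[:mid] / seg[mid:] with 1 ≤ mid < len(seg) are exactly take/drop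
def pvSummarizeB : List (List (String × Option String)) → Int × Option String × Option String
  | [] => (0, none, none)      -- never reached (summarize is only called on non-empty segments)
  | [row] => pvLeafB row
  | row :: next :: rest =>
      pvCombineB (pvSummarizeB ((row :: next :: rest).take ((row :: next :: rest).length / 2)))
                 (pvSummarizeB ((row :: next :: rest).drop ((row :: next :: rest).length / 2)))
termination_by seg => seg.length
decreasing_by
  all_goals simp only [List.length_take, List.length_drop, List.length_cons]; omega

def manager_change_count_py_alt (manager_rows : List (List (String × Option String))) (window : Int) : Int :=
  if PySem.List.slice manager_rows (some (-window)) none = [] then 0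
  else (pvSummarizeB (PySem.List.slice manager_rows (some (-window)) none)).1

-- ===== PRECONDITION & SPEC =====
def Spec_manager_change_count_py (manager_rows : List (List (String × Option String))) (window : Int) (out : Int) : Prop := out = manager_change_count_py_alt manager_rows window
instance (manager_rows : List (List (String × Option String))) (window : Int) (out : Int) : Decidable (Spec_manager_change_count_py manager_rows window out) := by unfold Spec_manager_change_count_py; infer_instance

-- ===== CLAIM (what is proved, stated in full; the proofs are below) =====
def Claim_equal_manager_change_count_py : Prop := ∀ (manager_rows : List (List (String × Option String))) (window : Int), Dom_manager_change_count_py manager_rows window → Spec_manager_change_count_py manager_rows window (manager_change_count_py manager_rows window)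

-- ===== LEMMAS AND PROOFS =====

-- the filtered normalized name list of a segment
def pvFNames (l : List (List (String × Option String))) : List String :=
  (l.map pvNormNameA).filter (fun n => n ≠ "")

-- number of adjacent unequal pairs
def pvPairDiffCount (names : List String) : Int :=
  ((names.zip (names.drop 1)).filter (fun p => p.1 ≠ p.2)).length

theorem pvPairDiffCount_cons2 (a b : String) (l : List String) :
    pvPairDiffCount (a :: b :: l) = (if a ≠ b then 1 else 0) + pvPairDiffCount (b :: l) := by
  simp only [pvPairDiffCount, List.drop_succ_cons, List.drop_zero, List.zip_cons_cons,
    List.filter_cons]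
  by_cases h : a = b <;> simp [h] <;> omega

-- pair-difference count over an append: the two halves plus a boundary term
theorem pvPairDiffCount_append (xs ys : List String) :
    pvPairDiffCount (xs ++ ys) = pvPairDiffCount xs + pvPairDiffCount ys +
      (match xs.getLast?, ys.head? with
       | some a, some b => if a ≠ b then (1 : Int) else 0
       | _, _ => 0) := by
  induction xs with
  | nil => cases ys <;> simp [pvPairDiffCount]
  | cons a xs ih =>
    cases xs with
    | nil =>
      cases ys with
      | nil => simp [pvPairDiffCount]
      | cons b ys =>
        have h0 : pvPairDiffCount [a] = 0 := by simp [pvPairDiffCount]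
        rw [show ([a] ++ b :: ys) = a :: b :: ys from rfl, pvPairDiffCount_cons2, h0]
        by_cases h : a = b <;> simp [h] <;> try omega
    | cons a' xs' =>
      have h1 : pvPairDiffCount ((a :: a' :: xs') ++ ys) =
          (if a ≠ a' then (1:Int) else 0) + pvPairDiffCount ((a' :: xs') ++ ys) := by
        simpa using pvPairDiffCount_cons2 a a' (xs' ++ ys)
      rw [h1, ih, pvPairDiffCount_cons2]
      simp [List.getLast?_cons_cons]
      omega

-- characterization: summarize seg = (pairDiff of filtered names, its head?, its getLast?)
theorem pvSummarizeB_spec (l : List (List (String × Option String))) :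
    pvSummarizeB l = (pvPairDiffCount (pvFNames l), (pvFNames l).head?, (pvFNames l).getLast?) := by
  fun_induction pvSummarizeB l with
  | case1 => simp [pvFNames, pvPairDiffCount]
  | case2 row =>
    have hleaf : pvLeafB row = (if pvNormNameA row ≠ "" then ((0:Int), some (pvNormNameA row), some (pvNormNameA row)) else (0, none, none)) := rfl
    rw [hleaf]
    by_cases h : pvNormNameA row = "" <;> simp [h, pvFNames, pvPairDiffCount]
  | case3 row next rest ih1 ih2 =>
    have hor : ∀ (x y : Option String),
        (match x with | some v => some v | none => y) = x.or y := by
      intro x y; cases x <;> rfl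
    have hcross : ∀ (x y : Option String),
        (match x, y with | some l1, some f2 => if l1 ≠ f2 then (1:Int) else 0 | _, _ => 0) =
        (match x, y with | some a, some b => if a ≠ b then (1:Int) else 0 | _, _ => 0) := by
      intro x y; cases x <;> cases y <;> rfl
    rw [ih1, ih2, pvCombineB]
    have hsplit : pvFNames (row :: next :: rest) =
        pvFNames ((row :: next :: rest).take ((row :: next :: rest).length / 2)) ++
        pvFNames ((row :: next :: rest).drop ((row :: next :: rest).length / 2)) := by
      simp [pvFNames, ← List.map_append, ← List.filter_append]
    rw [hsplit, pvPairDiffCount_append, List.head?_append, List.getLast?_append]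
    exact Prod.ext (by rw [hcross]) (Prod.ext (hor _ _) (hor _ _))

-- loop invariant for A's fold
theorem pvLoopA (rows : List (List (String × Option String))) (prev : String) (count : Int) :
    (rows.foldl pvStepA (prev, count)).2 =
      count + (if prev = "" then pvPairDiffCount (pvFNames rows)
               else pvPairDiffCount (prev :: pvFNames rows)) := by
  induction rows generalizing prev count with
  | nil => by_cases h : prev = "" <;> simp [h, pvPairDiffCount, pvFNames]
  | cons row rows ih =>
    simp only [List.foldl_cons, pvFNames, List.map_cons, List.filter_cons]
    by_cases hn : pvNormNameA row = ""
    · by_cases hp : prev = "" <;> simp [pvStepA, hn, hp, ih, pvFNames]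
    · by_cases hp : prev = ""
      · simp [pvStepA, hn, hp, ih, pvFNames]
      · by_cases hne : pvNormNameA row = prev
        · simp [pvStepA, hn, hp, hne, ih, pvFNames, pvPairDiffCount_cons2]
        · have hcond : prev ≠ "" ∧ pvNormNameA row ≠ "" ∧ pvNormNameA row ≠ prev := ⟨hp, hn, hne⟩
          simp [pvStepA, if_pos hcond, hn, hp, hne, ih, pvFNames, pvPairDiffCount_cons2, Ne.symm hne]
          omega

theorem manager_change_count_eq (manager_rows : List (List (String × Option String))) (window : Int) :
    manager_change_count_py manager_rows window = manager_change_count_py_alt manager_rows window := by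
  unfold manager_change_count_py manager_change_count_py_alt
  by_cases h : manager_rows = []
  · simp [h, PySem.List.slice, pvPairDiffCount]
  · rw [if_neg h, pvLoopA, pvSummarizeB_spec]
    rw [if_pos (rfl : ("" : String) = "")]
    rw [zero_add]
    by_cases hs : PySem.List.slice manager_rows (some (-window)) none = []
    · simp [hs, pvFNames, pvPairDiffCount]
    · simp [hs]

-- ===== VERDICT (by name: the statement is the Claim_ definition above) =====
theorem manager_change_count_py_spec : Claim_equal_manager_change_count_py := by
  intro mr w _
  exact manager_change_count_eq mr w
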